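-- pv_equiv track=rewrite | github.com/alea-institute/leeky | leeky/nlp.py | get_ws_tokens
-- ===== SOURCE A (Python) =====
-- def get_ws_token_boundaries(text: str) -> list[int]:
--     """
--     This method returns the token splits for a given text based on very simple
--     non-consecutive whitespace tokenization.
--     """
--     if len(text) == 0:
--         return []
--
--     # get whitespace positions
--     whitespace_index = [i for i, c in enumerate(text) if c.isspace()]
--
--     # remove consecutive whitespace positions
--     whitespace_index = [
--         whitespace_index[i]
--         for i in range(len(whitespace_index))
--         if i == 0 or whitespace_index[i] != whitespace_index[i - 1] + 1
--     ]
--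
--     # return the whitespace positions with initial position
--     return [0] + whitespace_index + [len(text)]
--
-- def get_ws_tokens(text: str, lowercase: bool = False) -> list[str]:
--     """
--     This method returns the tokens for a given text based on very simple
--     non-consecutive whitespace tokenization.
--     """
--     # get the token splits
--     token_splits = get_ws_token_boundaries(text)
--
--     # get the tokens
--     tokens = [
--         text[token_splits[i] : token_splits[i + 1]].strip().lower()
--         if lowercase
--         else text[token_splits[i] : token_splits[i + 1]].strip()
--         for i in range(len(token_splits) - 1)
--     ]
--
--     # return the tokens
--     return tokens
-- ===== SOURCE B (Python) =====
-- def get_ws_tokens(text: str, lowercase: bool = False) -> list[str]: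
--     """Whitespace tokenization: str.split() plus the empty edge tokens that a
--     boundary at a leading/trailing whitespace run produces."""
--     if not text:
--         return []
--     tokens = text.split()
--     if text[0].isspace():
--         tokens.insert(0, "")
--     if text[-1].isspace():
--         tokens.append("")
--     if lowercase:
--         tokens = [t.lower() for t in tokens]
--     return tokens
-- ===== Notes on version B (the rewrite author's own statement) =====
-- stated objective: idiomatic
-- what changed: Replaces the index pipeline (enumerate whitespace positions, collapse consecutive ones, slice between boundaries and strip each slice) with str.split() for the words plus one empty edge token when the text starts/ends with whitespace.
import Mathlib
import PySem

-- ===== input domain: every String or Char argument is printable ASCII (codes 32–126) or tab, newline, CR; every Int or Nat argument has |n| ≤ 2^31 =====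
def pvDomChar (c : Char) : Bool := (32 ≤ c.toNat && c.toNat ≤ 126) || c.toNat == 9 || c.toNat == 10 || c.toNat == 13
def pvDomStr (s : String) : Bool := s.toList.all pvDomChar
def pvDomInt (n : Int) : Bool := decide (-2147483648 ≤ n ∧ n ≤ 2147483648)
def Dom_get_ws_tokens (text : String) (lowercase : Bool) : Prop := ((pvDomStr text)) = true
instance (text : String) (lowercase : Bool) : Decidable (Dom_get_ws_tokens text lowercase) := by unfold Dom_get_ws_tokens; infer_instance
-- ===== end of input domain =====

-- B replaces A's whitespace-index pipeline by str.split() words plus empty edge tokens (idiomatic; same O(n), measured faster by constant factor).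

-- ===== PORT A =====
def get_ws_token_boundaries (text : String) : List Int :=
  if PySem.Str.len text = 0 then []
  else
    let whitespace_index : List Int :=
      ((PySem.List.enumerate text.toList 0).filter (fun p => PySem.Chars.isspace p.2)).map (fun p => p.1)
    let whitespace_index2 : List Int :=
      ((PySem.List.pyRange 0 (whitespace_index.length : Int) 1).filter (fun i =>
          i == 0 || !(PySem.List.pyGetD whitespace_index i 0 == PySem.List.pyGetD whitespace_index (i - 1) 0 + 1))).map
        (fun i => PySem.List.pyGetD whitespace_index i 0)
    (0 : Int) :: whitespace_index2 ++ [PySem.Str.len text]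

def get_ws_tokens (text : String) (lowercase : Bool) : List String :=
  let token_splits := get_ws_token_boundaries text
  (PySem.List.pyRange 0 ((token_splits.length : Int) - 1) 1).map (fun i =>
    if lowercase then
      PySem.Str.lower (PySem.Str.strip (PySem.Str.slice text
        (some (PySem.List.pyGetD token_splits i 0)) (some (PySem.List.pyGetD token_splits (i + 1) 0))))
    else
      PySem.Str.strip (PySem.Str.slice text
        (some (PySem.List.pyGetD token_splits i 0)) (some (PySem.List.pyGetD token_splits (i + 1) 0))))

-- ===== PORT B =====
def get_ws_tokens_alt (text : String) (lowercase : Bool) : List String :=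
  if text = "" then []
  else
    let tokens := PySem.Str.split₀ text
    let tokens := if PySem.Chars.isspace (text.toList.headD ' ') then "" :: tokens else tokens
    let tokens := if PySem.Chars.isspace (text.toList.getLastD ' ') then tokens ++ [""] else tokens
    if lowercase then tokens.map PySem.Str.lower else tokens

-- ===== PRECONDITION & SPEC =====
def Spec_get_ws_tokens (text : String) (lowercase : Bool) (out : List String) : Prop := out = get_ws_tokens_alt text lowercase
instance (text : String) (lowercase : Bool) (out : List String) : Decidable (Spec_get_ws_tokens text lowercase out) := by unfold Spec_get_ws_tokens; infer_instance

-- ===== CLAIM (what is proved, stated in full; the proofs are below) =====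
def Claim_equal_get_ws_tokens : Prop := ∀ (text : String) (lowercase : Bool), Dom_get_ws_tokens text lowercase → Spec_get_ws_tokens text lowercase (get_ws_tokens text lowercase)

-- ===== LEMMAS AND PROOFS =====

-- whitespace positions of a suffix, enumeration starting at i
def wsIdxF : List Char → Int → List Int
  | [], _ => []
  | c :: t, i => (if PySem.Chars.isspace c then [i] else []) ++ wsIdxF t (i + 1)

-- run starts: whitespace positions whose previous char is not whitespace (prev = "previous char was ws")
def rsF : List Char → Bool → Int → List Int
  | [], _, _ => []
  | c :: t, prev, i =>
      (if PySem.Chars.isspace c && !prev then [i] else []) ++ rsF t (PySem.Chars.isspace c) (i + 1)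

-- drop an element equal to predecessor + 1
def collapseF : Int → List Int → List Int
  | _, [] => []
  | p, y :: t => (if y = p + 1 then [] else [y]) ++ collapseF y t

-- the maximal non-whitespace runs
def tokWords : List Char → List (List Char)
  | [] => []
  | c :: t =>
      if PySem.Chars.isspace c then tokWords t
      else (c :: t.takeWhile (fun d => !PySem.Chars.isspace d)) :: tokWords (t.dropWhile (fun d => !PySem.Chars.isspace d))
  termination_by l => l.length
  decreasing_by
    · simp
    · simpa using Nat.lt_succ_of_le (t.length_dropWhile_le _)

def gSeg (t : List Char) (a b : Int) : List Char :=
  PySem.Chars.strip (PySem.List.slice t (some a) (some b))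

theorem wsidx_eq (l : List Char) : ∀ (i : Int),
    ((PySem.List.enumerate l i).filter (fun p => PySem.Chars.isspace p.2)).map (fun p => p.1) = wsIdxF l i := by
  induction l with
  | nil => intro i; simp [PySem.List.enumerate_nil, wsIdxF]
  | cons c t ih =>
      intro i
      by_cases h : PySem.Chars.isspace c = true <;>
        simp [PySem.List.enumerate_cons, wsIdxF, h, ih (i + 1)]

theorem wsIdxF_ge (l : List Char) : ∀ (i : Int), ∀ y ∈ wsIdxF l i, i ≤ y := by
  induction l with
  | nil => intro i y hy; simp [wsIdxF] at hy
  | cons c t ih =>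
      intro i y hy
      by_cases h : PySem.Chars.isspace c = true <;> simp [wsIdxF, h] at hy
      · rcases hy with rfl | hy
        · omega
        · have := ih (i + 1) y hy; omega
      · have := ih (i + 1) y hy; omega

theorem rsF_ge (l : List Char) : ∀ (b : Bool) (i : Int), ∀ y ∈ rsF l b i, i ≤ y := by
  induction l with
  | nil => intro b i y hy; simp [rsF] at hy
  | cons c t ih =>
      intro b i y hy
      simp [rsF] at hy
      rcases hy with ⟨_, rfl⟩ | hy
      · omega
      · have := ih _ (i + 1) y hy; omega

theorem aux_filt (w : List Int) : ∀ (n k : Nat), w.length ≤ k + n → 1 ≤ k →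
    ((PySem.List.pyRange (k : Int) (w.length : Int) 1).filter (fun i =>
        i == 0 || !(PySem.List.pyGetD w i 0 == PySem.List.pyGetD w (i - 1) 0 + 1))).map
      (fun i => PySem.List.pyGetD w i 0)
    = collapseF (PySem.List.pyGetD w ((k : Int) - 1) 0) (w.drop k) := by
  intro n
  induction n with
  | zero =>
      intro k hlen hk
      rw [PySem.List.pyRange_one_eq_nil (by exact_mod_cast hlen), List.drop_eq_nil_of_le (by omega)]
      simp [collapseF]
  | succ n ih =>
      intro k hlen hk
      by_cases hl : w.length ≤ k
      · rw [PySem.List.pyRange_one_eq_nil (by exact_mod_cast hl), List.drop_eq_nil_of_le (by omega)]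
        simp [collapseF]
      · have hk2 : k < w.length := by omega
        have hk1 : k - 1 < w.length := by omega
        rw [PySem.List.pyRange_one_cons (by exact_mod_cast hk2), List.filter_cons]
        have hgk : PySem.List.pyGetD w (k : Int) 0 = w[k] := by
          rw [PySem.List.pyGetD_natCast, List.getD_eq_getElem _ _ hk2]
        have hgk1 : PySem.List.pyGetD w ((k : Int) - 1) 0 = w[k - 1] := by
          have e1 : (k : Int) - 1 = ((k - 1 : Nat) : Int) := by omega
          rw [e1, PySem.List.pyGetD_natCast, List.getD_eq_getElem _ _ hk1]
        have hc0 : ((k : Int) == 0) = false := by simp; omega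
        have hih := ih (k + 1) (by omega) (by omega)
        have e2 : (k : Int) + 1 = ((k + 1 : Nat) : Int) := by push_cast; ring
        have e3 : ((k + 1 : Nat) : Int) - 1 = (k : Int) := by push_cast; ring
        rw [e3, hgk] at hih
        have hdrop : w.drop k = w[k] :: w.drop (k + 1) := List.drop_eq_getElem_cons hk2
        rw [hdrop, collapseF]
        by_cases hdup : w[k] = w[k - 1] + 1
        · rw [if_neg (by simp [hc0, hgk, hgk1, hdup] : ¬ ((k : Int) == 0 || !(PySem.List.pyGetD w (k : Int) 0 == PySem.List.pyGetD w ((k : Int) - 1) 0 + 1)) = true)]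
          rw [if_pos (by rw [hgk1]; exact hdup), List.nil_append, e2, hih]
        · rw [if_pos (by simp [hc0, hgk, hgk1, hdup])]
          rw [if_neg (by rw [hgk1]; exact hdup), List.map_cons, hgk, e2, hih, List.singleton_append]

theorem filt_eq_collapse (w : List Int) (hw : ∀ y ∈ w, 0 ≤ y) :
    ((PySem.List.pyRange 0 (w.length : Int) 1).filter (fun i =>
        i == 0 || !(PySem.List.pyGetD w i 0 == PySem.List.pyGetD w (i - 1) 0 + 1))).map
      (fun i => PySem.List.pyGetD w i 0)
    = collapseF (-2) w := by
  rcases w with _ | ⟨x, t⟩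
  · norm_num [PySem.List.pyRange_one_eq_nil, collapseF]
  · have hlen : (0 : Int) < ((x :: t).length : Int) := by simp
    rw [PySem.List.pyRange_one_cons hlen, List.filter_cons, if_pos (by simp)]
    have hih := aux_filt (x :: t) (x :: t).length 1 (by omega) (by omega)
    have hg0 : PySem.List.pyGetD (x :: t) (0 : Int) 0 = x := PySem.List.pyGetD_zero_cons x t 0
    have hg1 : PySem.List.pyGetD (x :: t) (((1 : Nat) : Int) - 1) 0 = x := by
      norm_num [hg0]
    rw [hg1] at hih
    have hx : x ≠ -2 + 1 := by have := hw x (by simp); omega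
    rw [List.map_cons, hg0, collapseF, if_neg hx, List.singleton_append]
    have e1 : ((0 : Int) + 1) = ((1 : Nat) : Int) := by norm_num
    rw [e1, hih]
    rfl

theorem collapse_wsIdx (l : List Char) : ∀ (i p : Int), p < i →
    collapseF p (wsIdxF l i) = rsF l (p == i - 1) i := by
  induction l with
  | nil => intro i p _; simp [wsIdxF, collapseF, rsF]
  | cons c t ih =>
      intro i p hpi
      by_cases h : PySem.Chars.isspace c = true
      · have h2 := ih (i + 1) i (by omega)
        have e1 : i + 1 - 1 = i := by ring
        rw [wsIdxF, if_pos h, List.singleton_append, collapseF, h2, e1, beq_self_eq_true, rsF, h]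
        by_cases hp : p = i - 1
        · rw [if_pos (by omega : i = p + 1), if_neg (by simp [hp])]
        · rw [if_neg (by omega : ¬ i = p + 1), if_pos (by simp [hp])]
      · have hc : PySem.Chars.isspace c = false := by simpa using h
        have h2 := ih (i + 1) p (by omega)
        have e1 : i + 1 - 1 = i := by ring
        have hne : (p == i) = false := by simp; omega
        rw [wsIdxF, if_neg (by simp [hc]), List.nil_append, h2, e1,
            rsF, if_neg (by simp [hc]), List.nil_append, hc, hne]

theorem starts_eq (l : List Char) :
    ((PySem.List.pyRange 0 ((wsIdxF l 0).length : Int) 1).filter (fun i =>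
        i == 0 || !(PySem.List.pyGetD (wsIdxF l 0) i 0 == PySem.List.pyGetD (wsIdxF l 0) (i - 1) 0 + 1))).map
      (fun i => PySem.List.pyGetD (wsIdxF l 0) i 0)
    = rsF l false 0 := by
  rw [filt_eq_collapse _ (wsIdxF_ge l 0)]
  have h := collapse_wsIdx l 0 (-2) (by omega)
  have e : ((-2 : Int) == 0 - 1) = false := by decide
  rw [e] at h
  exact h

theorem boundaries_eq (text : String) (h : text.toList ≠ []) :
    get_ws_token_boundaries text = (0 : Int) :: rsF text.toList false 0 ++ [(text.toList.length : Int)] := by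
  have hlen : ¬ PySem.Str.len text = 0 := by
    rw [PySem.Str.len_eq]
    simp
    exact fun he => h (by simp [he])
  rw [get_ws_token_boundaries, if_neg hlen]
  simp only [wsidx_eq text.toList 0, starts_eq text.toList, PySem.Str.len_eq]

theorem rsF_shift (l : List Char) : ∀ (b : Bool) (i j : Int), rsF l b (i + j) = (rsF l b i).map (· + j) := by
  induction l with
  | nil => intro b i j; simp [rsF]
  | cons c t ih =>
      intro b i j
      have heq : i + j + 1 = (i + 1) + j := by ring
      by_cases h : (PySem.Chars.isspace c && !b) = true <;>
        simp [rsF, h, heq, ih (PySem.Chars.isspace c) (i + 1) j]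

theorem rsF_nonws_append (w : List Char) : ∀ (m : List Char) (b : Bool) (i : Int),
    (∀ c ∈ w, PySem.Chars.isspace c = false) →
    rsF (w ++ m) b i = rsF m (if w.isEmpty then b else false) (i + w.length) := by
  induction w with
  | nil => intro m b i _; simp
  | cons c w ih =>
      intro m b i hall
      have hc : PySem.Chars.isspace c = false := hall c (by simp)
      rw [List.cons_append, rsF, if_neg (by simp [hc]), List.nil_append, hc,
          ih m false (i + 1) (fun x hx => hall x (by simp [hx]))]
      have e : i + 1 + (w.length : Int) = i + ((c :: w).length : Int) := by push_cast [List.length_cons]; ring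
      rw [e]
      simp

theorem rsF_ws_append_true (u : List Char) : ∀ (m : List Char) (j : Int),
    (∀ c ∈ u, PySem.Chars.isspace c = true) →
    rsF (u ++ m) true j = rsF m true (j + u.length) := by
  induction u with
  | nil => intro m j _; simp
  | cons d u ih =>
      intro m j hall
      have hd : PySem.Chars.isspace d = true := hall d (by simp)
      rw [List.cons_append, rsF, if_neg (by simp), List.nil_append, hd,
          ih m (j + 1) (fun x hx => hall x (by simp [hx]))]
      have e : j + 1 + (u.length : Int) = j + ((d :: u).length : Int) := by push_cast [List.length_cons]; ring
      rw [e]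

theorem rsF_ws_append (u : List Char) (m : List Char) (i : Int) (hne : u ≠ [])
    (hall : ∀ c ∈ u, PySem.Chars.isspace c = true) :
    rsF (u ++ m) false i = i :: rsF m true (i + u.length) := by
  rcases u with _ | ⟨c, u⟩
  · simp at hne
  · have hc : PySem.Chars.isspace c = true := hall c (by simp)
    rw [List.cons_append, rsF, if_pos (by simp [hc]), List.singleton_append, hc,
        rsF_ws_append_true u m (i + 1) (fun x hx => hall x (by simp [hx]))]
    have e : i + 1 + (u.length : Int) = i + ((c :: u).length : Int) := by push_cast [List.length_cons]; ring
    rw [e]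

theorem rsF_prev_irrel (m : List Char) (h : PySem.Chars.isspace (m.headD 'x') = false) (b b' : Bool) (i : Int) :
    rsF m b i = rsF m b' i := by
  rcases m with _ | ⟨c, t⟩
  · simp [rsF]
  · simp only [List.headD_cons] at h
    simp [rsF, h]

theorem strip_nonws (w : List Char) (h : ∀ c ∈ w, PySem.Chars.isspace c = false) :
    PySem.Chars.strip w = w := by
  have h1 : List.dropWhile PySem.Chars.isspace w = w := by
    rw [List.dropWhile_eq_self_iff]
    intro hx
    simp [h _ (List.getElem_mem hx)]
  have h2 : List.dropWhile PySem.Chars.isspace w.reverse = w.reverse := by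
    rw [List.dropWhile_eq_self_iff]
    intro hx
    have hm : w.reverse[0] ∈ w := by
      have := List.getElem_mem hx
      rwa [List.mem_reverse] at this
    simp
    exact h _ (List.getElem_mem _)
  simp [PySem.Chars.strip, PySem.Chars.lstrip, PySem.Chars.rstrip, h1, h2]

theorem strip_ws_append (u : List Char) (x : List Char) (h : ∀ c ∈ u, PySem.Chars.isspace c = true) :
    PySem.Chars.strip (u ++ x) = PySem.Chars.strip x := by
  have h1 : ∀ (u' : List Char), (∀ c ∈ u', PySem.Chars.isspace c = true) →
      List.dropWhile PySem.Chars.isspace (u' ++ x) = List.dropWhile PySem.Chars.isspace x := by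
    intro u'
    induction u' with
    | nil => intro _; simp
    | cons d u'' ih =>
        intro h'
        rw [List.cons_append, List.dropWhile_cons_of_pos (by simp [h' d (by simp)])]
        exact ih (fun c hc => h' c (by simp [hc]))
  simp only [PySem.Chars.strip, PySem.Chars.lstrip, h1 u h]


theorem tokWords_ws_append (u : List Char) (m : List Char) (h : ∀ c ∈ u, PySem.Chars.isspace c = true) :
    tokWords (u ++ m) = tokWords m := by
  induction u with
  | nil => simp
  | cons c u ih =>
      have hc : PySem.Chars.isspace c = true := h c (by simp)
      rw [List.cons_append, tokWords, if_pos hc]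
      exact ih (fun x hx => h x (by simp [hx]))

theorem split₀_eq_tokWords (l : List Char) : PySem.Chars.split₀ l = tokWords l := by
  have go_spec : ∀ (l : List Char) (cur : List Char) (acc : List (List Char)),
      PySem.Chars.split₀.go l cur acc =
        acc.reverse ++ (if cur.isEmpty then tokWords l
          else (cur.reverse ++ l.takeWhile (fun d => !PySem.Chars.isspace d))
            :: tokWords (l.dropWhile (fun d => !PySem.Chars.isspace d))) := by
    intro l
    induction l with
    | nil =>
        intro cur acc
        rcases cur with _ | ⟨x, cur⟩ <;> simp [PySem.Chars.split₀.go, tokWords]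
    | cons c t ih =>
        intro cur acc
        by_cases h : PySem.Chars.isspace c = true
        · rcases cur with _ | ⟨x, cur⟩
          · rw [PySem.Chars.split₀.go, if_pos h, if_pos (by simp), ih]
            simp [tokWords, h]
          · rw [PySem.Chars.split₀.go, if_pos h, if_neg (by simp), ih]
            simp only [List.isEmpty_nil, if_pos, List.reverse_cons, List.isEmpty_cons,
              List.takeWhile_cons, List.dropWhile_cons, h]
            simp [tokWords, h]
        · have hc : PySem.Chars.isspace c = false := by simpa using h
          rw [PySem.Chars.split₀.go, if_neg h, ih]
          rcases cur with _ | ⟨x, cur⟩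
          · simp only [List.isEmpty_cons, List.isEmpty_nil, if_neg (by simp : ¬ false = true)]
            rw [tokWords, if_neg h]
            simp [List.takeWhile_cons, List.dropWhile_cons, hc]
          · simp [List.takeWhile_cons, List.dropWhile_cons, hc]
  rw [PySem.Chars.split₀, go_spec]
  simp

theorem zipWith_congr' {α β : Type} (f g : α → α → β) : ∀ (X Y : List α),
    (∀ a ∈ X, ∀ b ∈ Y, f a b = g a b) → List.zipWith f X Y = List.zipWith g X Y := by
  intro X
  induction X with
  | nil => intro Y _; simp
  | cons x X ih =>
      intro Y h
      rcases Y with _ | ⟨y, Y⟩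
      · simp
      · simp only [List.zipWith_cons_cons]
        rw [h x (by simp) y (by simp), ih Y (fun a ha b hb => h a (by simp [ha]) b (by simp [hb]))]

theorem map_range_adj {β : Type} (g : Int → Int → β) (s : List Int) : ∀ (n k : Nat), s.length ≤ k + n + 1 →
    (PySem.List.pyRange (k : Int) ((s.length : Int) - 1) 1).map
      (fun i => g (PySem.List.pyGetD s i 0) (PySem.List.pyGetD s (i + 1) 0))
    = List.zipWith g (s.drop k) (s.drop (k + 1)) := by
  intro n
  induction n with
  | zero =>
      intro k hlen
      rw [PySem.List.pyRange_one_eq_nil (by omega), List.map_nil,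
          List.drop_eq_nil_of_le (show s.length ≤ k + 1 by omega), List.zipWith_nil_right]
  | succ n ih =>
      intro k hlen
      by_cases hl : s.length ≤ k + 1
      · rw [PySem.List.pyRange_one_eq_nil (by omega), List.map_nil,
            List.drop_eq_nil_of_le (show s.length ≤ k + 1 by omega), List.zipWith_nil_right]
      · have hk2 : k + 1 < s.length := by omega
        have e2 : (k : Int) + 1 = ((k + 1 : Nat) : Int) := by push_cast; ring
        have hgk : PySem.List.pyGetD s (k : Int) 0 = s[k] := by
          rw [PySem.List.pyGetD_natCast, List.getD_eq_getElem _ _ (by omega)]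
        have hgk1 : PySem.List.pyGetD s ((k : Int) + 1) 0 = s[k + 1] := by
          rw [e2, PySem.List.pyGetD_natCast, List.getD_eq_getElem _ _ hk2]
        rw [PySem.List.pyRange_one_cons (by omega), List.map_cons, hgk, hgk1, e2,
            ih (k + 1) (by omega),
            List.drop_eq_getElem_cons (show k < s.length by omega),
            show s.drop (k + 1) = s[k + 1] :: s.drop (k + 1 + 1) from List.drop_eq_getElem_cons hk2,
            List.zipWith_cons_cons]

theorem getLastD_cons_ne (c : Char) (l : List Char) (d : Char) (h : l ≠ []) :
    (c :: l).getLastD d = l.getLastD d := by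
  rcases l with _ | ⟨x, l⟩
  · simp at h
  · rfl

theorem getLastD_mem (t : List Char) (h : t ≠ []) : t.getLastD ' ' ∈ t := by
  induction t with
  | nil => simp at h
  | cons c r ih =>
      rcases r with _ | ⟨x, r⟩
      · simp
      · rw [getLastD_cons_ne c _ ' ' (by simp)]
        exact List.mem_cons_of_mem _ (ih (by simp))

theorem getLastD_append_right (w m : List Char) (h : m ≠ []) (d : Char) :
    (w ++ m).getLastD d = m.getLastD d := by
  induction w with
  | nil => simp
  | cons c w ih =>
      rw [List.cons_append, getLastD_cons_ne c _ d (by simp [h]), ih]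

theorem gseg_shift (w m : List Char) (a b : Int) (ha : 0 ≤ a) (hb : 0 ≤ b) :
    gSeg (w ++ m) (a + (w.length : Int)) (b + (w.length : Int)) = gSeg m a b := by
  unfold gSeg
  congr 1
  rw [PySem.List.slice_toNat _ (by omega) (by omega), PySem.List.slice_toNat _ ha hb]
  have e1 : (a + (w.length : Int)).toNat = w.length + a.toNat := by omega
  have e2 : (b + (w.length : Int)).toNat - (a + (w.length : Int)).toNat = b.toNat - a.toNat := by omega
  rw [e2, e1, List.drop_append, List.drop_eq_nil_of_le (by omega), List.nil_append,
      Nat.add_sub_cancel_left]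

theorem gseg_zero_shift (u m : List Char) (hu : ∀ c ∈ u, PySem.Chars.isspace c = true)
    (b : Int) (hb : 0 ≤ b) :
    gSeg (u ++ m) 0 (b + (u.length : Int)) = gSeg m 0 b := by
  unfold gSeg
  rw [PySem.List.slice_toNat _ (by omega) (by omega), PySem.List.slice_toNat _ (by omega) hb]
  simp only [Int.toNat_zero, List.drop_zero, Nat.sub_zero]
  have e : (b + (u.length : Int)).toNat = u.length + b.toNat := by omega
  rw [e, List.take_append, List.take_of_length_le (by omega), Nat.add_sub_cancel_left]
  exact strip_ws_append u _ hu

theorem gseg_zero_zero (t : List Char) : gSeg t 0 0 = [] := by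
  unfold gSeg
  rw [PySem.List.slice_toNat _ (by omega) (by omega)]
  simp [PySem.Chars.strip, PySem.Chars.lstrip, PySem.Chars.rstrip]

theorem gseg_full (t : List Char) : gSeg t 0 (t.length : Int) = PySem.Chars.strip t := by
  unfold gSeg
  rw [PySem.List.slice_toNat _ (by omega) (by omega)]
  simp

theorem gseg_first (w m : List Char) : gSeg (w ++ m) 0 (w.length : Int) = PySem.Chars.strip w := by
  unfold gSeg
  rw [PySem.List.slice_toNat _ (by omega) (by omega)]
  simp

theorem zip_head_special (u m : List Char) (hu : ∀ c ∈ u, PySem.Chars.isspace c = true)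
    (Y : List Int) (hY : ∀ b ∈ Y, 0 ≤ b) :
    List.zipWith (gSeg (u ++ m)) ((0 : Int) :: Y.map (· + (u.length : Int))) (Y.map (· + (u.length : Int)))
    = List.zipWith (gSeg m) (0 :: Y) Y := by
  rcases Y with _ | ⟨y, Y'⟩
  · simp
  · have h1 : (y :: Y').map (· + (u.length : Int))
        = (y + (u.length : Int)) :: Y'.map (· + (u.length : Int)) := rfl
    rw [h1, List.zipWith_cons_cons, ← h1, List.zipWith_map, List.zipWith_cons_cons]
    congr 1
    · exact gseg_zero_shift u m hu y (hY y (by simp))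
    · exact zipWith_congr' _ _ _ _
        (fun a ha b hb => gseg_shift u m a b (hY a (by simp [ha])) (hY b (by simp [hb])))

theorem dropWhile_head_false {p : Char → Bool} {r : List Char} {d : Char} {m' : List Char}
    (h : r.dropWhile p = d :: m') : p d = false := by
  induction r with
  | nil => simp at h
  | cons x r ih =>
      rw [List.dropWhile_cons] at h
      by_cases hx : p x = true
      · rw [if_pos hx] at h; exact ih h
      · rw [if_neg hx] at h
        cases h
        simpa using hx

theorem heart : ∀ (n : Nat) (t : List Char), t.length ≤ n → t ≠ [] →
    List.zipWith (gSeg t) ((0 : Int) :: rsF t false 0 ++ [(t.length : Int)]) (rsF t false 0 ++ [(t.length : Int)])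
    = (if PySem.Chars.isspace (t.headD ' ') then [([] : List Char)] else []) ++ tokWords t
        ++ (if PySem.Chars.isspace (t.getLastD ' ') then [([] : List Char)] else []) := by
  intro n
  induction n with
  | zero =>
      intro t hle hne
      rcases t with _ | ⟨c, r⟩
      · exact absurd rfl hne
      · simp at hle
  | succ n ih =>
      intro t hle hne
      rcases t with _ | ⟨c, r⟩
      · exact absurd rfl hne
      by_cases hc : PySem.Chars.isspace c = true
      · -- whitespace head
        set u := c :: r.takeWhile (fun d => PySem.Chars.isspace d) with hu
        set m := r.dropWhile (fun d => PySem.Chars.isspace d) with hm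
        have hum : u ++ m = c :: r := by
          rw [hu, hm, List.cons_append, List.takeWhile_append_dropWhile]
        have huall : ∀ x ∈ u, PySem.Chars.isspace x = true := by
          intro x hx
          rw [hu] at hx
          rcases List.mem_cons.mp hx with rfl | hx'
          · exact hc
          · exact List.mem_takeWhile_imp hx'
        have hune : u ≠ [] := by rw [hu]; simp
        have hrs : rsF (c :: r) false 0 = 0 :: rsF m true ((u.length : Int)) := by
          rw [← hum, rsF_ws_append u m 0 hune huall, zero_add]
        have hn : (((c :: r).length : Int)) = (m.length : Int) + (u.length : Int) := by
          rw [← hum]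
          push_cast [List.length_append]
          ring
        have hhead : (c :: r).headD ' ' = c := rfl
        by_cases hm0 : m = []
        · have hueq : u = c :: r := by rw [← hum, hm0, List.append_nil]
          have hstrip : PySem.Chars.strip (c :: r) = [] := by
            have h1 := strip_ws_append u [] huall
            rw [List.append_nil, hueq] at h1
            simpa [PySem.Chars.strip, PySem.Chars.lstrip, PySem.Chars.rstrip] using h1
          have htok : tokWords (c :: r) = [] := by
            have h1 := tokWords_ws_append u [] huall
            rw [List.append_nil, hueq] at h1
            simpa [tokWords] using h1
          have hlast : PySem.Chars.isspace ((c :: r).getLastD ' ') = true := by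
            apply huall
            rw [hueq]
            exact getLastD_mem _ (by simp)
          rw [hrs, hm0]
          simp only [rsF, List.cons_append, List.nil_append, List.zipWith_cons_cons,
            List.zipWith_nil_right, gseg_zero_zero]
          rw [show gSeg (c :: r) 0 (((c :: r).length : Int)) = PySem.Chars.strip (c :: r) from gseg_full _,
              hstrip, hhead, if_pos hc, htok, hlast, if_pos rfl]
          simp
        · obtain ⟨d, m', heq⟩ := List.exists_cons_of_ne_nil hm0
          have hdf : PySem.Chars.isspace d = false := by
            have h1 : r.dropWhile (fun d => PySem.Chars.isspace d) = d :: m' := by rw [← hm, heq]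
            exact dropWhile_head_false h1
          have hml : m.length ≤ n := by
            have h1 := List.length_dropWhile_le (fun d => PySem.Chars.isspace d) r
            rw [← hm] at h1
            simp at hle
            omega
          have hprev : rsF m true ((u.length : Int)) = rsF m false ((u.length : Int)) :=
            rsF_prev_irrel m (by rw [heq]; simpa using hdf) true false _
          have hshift : rsF m false ((u.length : Int)) = (rsF m false 0).map (· + (u.length : Int)) := by
            have h1 := rsF_shift m false 0 (u.length : Int)
            rwa [zero_add] at h1
          have hYb : ∀ b ∈ (rsF m false 0 ++ [(m.length : Int)]), 0 ≤ b := by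
            intro b hb
            rcases List.mem_append.mp hb with h1 | h2
            · have := rsF_ge m false 0 b h1; omega
            · simp at h2; omega
          have ihm := ih m hml hm0
          have hheadm : m.headD ' ' = d := by rw [heq]; rfl
          rw [hheadm, if_neg (by simp [hdf]), List.nil_append] at ihm
          simp only [List.cons_append] at ihm
          rw [hrs, hprev, hshift]
          simp only [List.cons_append]
          rw [List.zipWith_cons_cons, gseg_zero_zero]
          have hm2 : (rsF m false 0).map (· + (u.length : Int)) ++ [(((c :: r).length : Int))]
              = ((rsF m false 0 ++ [(m.length : Int)])).map (· + (u.length : Int)) := by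
            have hn' := hn
            simp only [List.length_cons] at hn'
            simp [List.map_append]
            omega
          rw [hm2, show gSeg (c :: r) = gSeg (u ++ m) from by rw [hum],
              zip_head_special u m huall _ hYb, ihm]
          have htok : tokWords (c :: r) = tokWords m := by
            have h1 := tokWords_ws_append u m huall
            rwa [hum] at h1
          have hlast : (c :: r).getLastD ' ' = m.getLastD ' ' := by
            rw [← hum, getLastD_append_right u m hm0]
          rw [hhead, htok, hlast, if_pos hc]
          simp
      · -- word head
        have hcf : PySem.Chars.isspace c = false := by simpa using hc
        set w := c :: r.takeWhile (fun d => !PySem.Chars.isspace d) with hw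
        set m := r.dropWhile (fun d => !PySem.Chars.isspace d) with hm
        have hwm : w ++ m = c :: r := by
          rw [hw, hm, List.cons_append, List.takeWhile_append_dropWhile]
        have hwall : ∀ x ∈ w, PySem.Chars.isspace x = false := by
          intro x hx
          rw [hw] at hx
          rcases List.mem_cons.mp hx with rfl | hx'
          · exact hcf
          · simpa using List.mem_takeWhile_imp hx'
        have hwne : w ≠ [] := by rw [hw]; simp
        have hwe : w.isEmpty = false := by rw [hw]; rfl
        have hrs : rsF (c :: r) false 0 = (rsF m false 0).map (· + (w.length : Int)) := by
          rw [← hwm, rsF_nonws_append w m false 0 hwall, hwe, if_neg (by simp),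
              rsF_shift m false 0 (w.length : Int)]
        have hn : (((c :: r).length : Int)) = (m.length : Int) + (w.length : Int) := by
          rw [← hwm]
          push_cast [List.length_append]
          ring
        have hhead : (c :: r).headD ' ' = c := rfl
        have htokw : tokWords (c :: r) = w :: tokWords m := by
          rw [tokWords, if_neg hc, ← hw, ← hm]
        by_cases hm0 : m = []
        · have hweq : w = c :: r := by rw [← hwm, hm0, List.append_nil]
          have hstrip : PySem.Chars.strip (c :: r) = c :: r := by
            rw [← hweq]
            exact strip_nonws w hwall
          have hlast : PySem.Chars.isspace ((c :: r).getLastD ' ') = false := by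
            apply hwall
            rw [hweq]
            exact getLastD_mem _ (by simp)
          rw [hrs, hm0]
          simp only [rsF, List.map_nil, List.cons_append, List.nil_append,
            List.zipWith_cons_cons, List.zipWith_nil_right]
          rw [show gSeg (c :: r) 0 (((c :: r).length : Int)) = PySem.Chars.strip (c :: r) from gseg_full _,
              hstrip, hhead, if_neg (by simp [hcf]), htokw, hm0, hlast]
          simp [tokWords, ← hweq]
        · obtain ⟨d, m', heq⟩ := List.exists_cons_of_ne_nil hm0
          have hd : PySem.Chars.isspace d = true := by
            have h1 : r.dropWhile (fun d => !PySem.Chars.isspace d) = d :: m' := by rw [← hm, heq]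
            have h2 := dropWhile_head_false h1
            simpa using h2
          have hml : m.length ≤ n := by
            have h1 := List.length_dropWhile_le (fun d => !PySem.Chars.isspace d) r
            rw [← hm] at h1
            simp at hle
            omega
          have hP : rsF m false 0 = 0 :: rsF m' true 1 := by
            rw [heq]
            simp [rsF, hd]
          have hXa : ∀ a ∈ ((0 : Int) :: (rsF m' true 1 ++ [(m.length : Int)])), 0 ≤ a := by
            intro a ha
            rcases List.mem_cons.mp ha with rfl | ha'
            · omega
            · rcases List.mem_append.mp ha' with h1 | h2
              · have := rsF_ge m' true 1 a h1; omega
              · simp at h2; omega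
          have hYb : ∀ b ∈ (rsF m' true 1 ++ [(m.length : Int)]), 0 ≤ b := fun b hb =>
            hXa b (List.mem_cons_of_mem _ hb)
          have ihm := ih m hml hm0
          rw [hP] at ihm
          have hheadm : m.headD ' ' = d := by rw [heq]; rfl
          rw [hheadm, if_pos hd] at ihm
          simp only [List.cons_append] at ihm
          rw [List.zipWith_cons_cons, gseg_zero_zero] at ihm
          have htail : List.zipWith (gSeg m) ((0 : Int) :: (rsF m' true 1 ++ [(m.length : Int)]))
              (rsF m' true 1 ++ [(m.length : Int)])
              = tokWords m ++ (if PySem.Chars.isspace (m.getLastD ' ') then [([] : List Char)] else []) := by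
            have h1 := congrArg List.tail ihm
            simpa using h1
          rw [hrs, hP]
          have hmap : ((0 : Int) :: rsF m' true 1).map (· + (w.length : Int))
              = (w.length : Int) :: (rsF m' true 1).map (· + (w.length : Int)) := by simp
          rw [hmap]
          simp only [List.cons_append]
          rw [List.zipWith_cons_cons]
          have hfirst : gSeg (c :: r) 0 ((w.length : Int)) = w := by
            rw [← hwm, gseg_first, strip_nonws w hwall]
          rw [hfirst]
          have hm1 : (w.length : Int) :: ((rsF m' true 1).map (· + (w.length : Int)) ++ [(((c :: r).length : Int))])
              = ((0 : Int) :: (rsF m' true 1 ++ [(m.length : Int)])).map (· + (w.length : Int)) := by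
            have hn' := hn
            simp only [List.length_cons] at hn'
            simp [List.map_append]
            omega
          have hm2 : (rsF m' true 1).map (· + (w.length : Int)) ++ [(((c :: r).length : Int))]
              = ((rsF m' true 1 ++ [(m.length : Int)])).map (· + (w.length : Int)) := by
            have hn' := hn
            simp only [List.length_cons] at hn'
            simp [List.map_append]
            omega
          rw [hm1, hm2, List.zipWith_map,
              zipWith_congr' _ (gSeg m) _ _ (fun a ha b hb => by
                rw [← hwm]; exact gseg_shift w m a b (hXa a ha) (hYb b hb)),
              htail]
          have hlast : (c :: r).getLastD ' ' = m.getLastD ' ' := by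
            rw [← hwm, getLastD_append_right w m hm0]
          rw [hhead, htokw, hlast,
              if_neg (show ¬ PySem.Chars.isspace c = true from by simp [hcf])]
          simp only [List.nil_append, List.cons_append]


theorem tokens_zip (text : String) (lowercase : Bool) (s : List Int) :
    (PySem.List.pyRange 0 ((s.length : Int) - 1) 1).map (fun i =>
      if lowercase then
        PySem.Str.lower (PySem.Str.strip (PySem.Str.slice text
          (some (PySem.List.pyGetD s i 0)) (some (PySem.List.pyGetD s (i + 1) 0))))
      else
        PySem.Str.strip (PySem.Str.slice text
          (some (PySem.List.pyGetD s i 0)) (some (PySem.List.pyGetD s (i + 1) 0))))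
    = List.zipWith (fun a b =>
        if lowercase then PySem.Str.lower (PySem.Str.strip (PySem.Str.slice text (some a) (some b)))
        else PySem.Str.strip (PySem.Str.slice text (some a) (some b))) s (s.drop 1) := by
  have h := map_range_adj (fun a b =>
      if lowercase then PySem.Str.lower (PySem.Str.strip (PySem.Str.slice text (some a) (some b)))
      else PySem.Str.strip (PySem.Str.slice text (some a) (some b))) s s.length 0 (by omega)
  simpa using h

theorem alt_toList (text : String) :
    ((if PySem.Chars.isspace (text.toList.getLastD ' ') then
        (if PySem.Chars.isspace (text.toList.headD ' ') then "" :: PySem.Str.split₀ text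
         else PySem.Str.split₀ text) ++ [""]
      else
        (if PySem.Chars.isspace (text.toList.headD ' ') then "" :: PySem.Str.split₀ text
         else PySem.Str.split₀ text))).map String.toList
    = (if PySem.Chars.isspace (text.toList.headD ' ') then [([] : List Char)] else []) ++ tokWords text.toList
        ++ (if PySem.Chars.isspace (text.toList.getLastD ' ') then [([] : List Char)] else []) := by
  by_cases h1 : PySem.Chars.isspace (text.toList.headD ' ') = true <;>
    by_cases h2 : PySem.Chars.isspace (text.toList.getLastD ' ') = true <;>
      simp only [List.headD_eq_head?_getD, List.getLastD_eq_getLast?] at h1 h2 <;>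
      simp [h1, h2, PySem.Str.split₀_map_toList, split₀_eq_tokWords]

-- ===== VERDICT (by name: the statement is the Claim_ definition above) =====
theorem get_ws_tokens_spec : Claim_equal_get_ws_tokens := by
  intro text lowercase _
  show get_ws_tokens text lowercase = get_ws_tokens_alt text lowercase
  by_cases h0 : text = ""
  · subst h0
    have hb : get_ws_token_boundaries "" = [] := by
      rw [get_ws_token_boundaries, if_pos (by decide)]
    rw [get_ws_tokens_alt, if_pos rfl]
    simp [get_ws_tokens, hb]
  · have hne : text.toList ≠ [] := fun h => h0 (String.ext (by simpa using h))
    have hinj : Function.Injective (List.map String.toList) :=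
      List.map_injective_iff.mpr (fun a b h => String.ext h)
    apply hinj
    have hb := boundaries_eq text hne
    have hheart := heart text.toList.length text.toList (le_refl _) hne
    simp only [List.cons_append] at hheart
    simp only [get_ws_tokens, get_ws_tokens_alt, if_neg h0]
    rw [tokens_zip text lowercase (get_ws_token_boundaries text), hb]
    simp only [List.cons_append, List.drop_succ_cons, List.drop_zero]
    rw [List.map_zipWith]
    rw [zipWith_congr' _
        (fun a b => if lowercase then PySem.Chars.lower (gSeg text.toList a b) else gSeg text.toList a b)
        _ _ (fun a _ b _ => by
          by_cases hlc : lowercase = true <;>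
            simp [hlc, gSeg, PySem.Str.toList_lower, PySem.Str.toList_strip, PySem.Str.toList_slice])]
    cases lowercase
    · simp only [Bool.false_eq_true, if_false]
      rw [hheart]
      exact (alt_toList text).symm
    · simp only [if_true]
      rw [← List.map_zipWith, hheart, List.map_map]
      have hcomp : String.toList ∘ PySem.Str.lower = PySem.Chars.lower ∘ String.toList := by
        funext x
        simp [PySem.Str.toList_lower]
      rw [hcomp, ← List.map_map, alt_toList text]
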